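-- pv_equiv track=rewrite | github.com/ThijsMaas/AdventOfCode | 2023/day2.py | game_min_cubes
-- ===== SOURCE A (Python) =====
-- def game_min_cubes(game_str: str):
--     game_min = [0, 0, 0]
--     for hand_str in game_str.split("; "):
--         hand_min = [0, 0, 0]
--         for color_str in hand_str.split(", "):
--             number, color = color_str.split(" ")
--             if color == "red":
--                 hand_min[0] += int(number)
--             elif color == "green":
--                 hand_min[1] += int(number)
--             elif color == "blue":
--                 hand_min[2] += int(number)
--         game_min = [
--             max(game_min[0], hand_min[0]),
--             max(game_min[1], hand_min[1]),
--             max(game_min[2], hand_min[2]),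
--         ]
--     return game_min
-- ===== SOURCE B (Python) =====
-- def game_min_cubes(game_str: str):
--     # Flat tokenizer: split the whole game once on " " and walk the token
--     # stream two at a time as (count, word) pairs.  A word's trailing "," / ";"
--     # is the delimiter that ended its chunk; ";" closes the hand, folding it
--     # into the running per-color maxima.  No nested per-hand/per-chunk splits.
--     best = [0, 0, 0]
--     cur = [0, 0, 0]
--     place = {"red": 0, "green": 1, "blue": 2}
--     tokens = game_str.split(" ")
--     for i in range(0, len(tokens), 2):
--         number, word = tokens[i:i + 2]
--         delim = word[-1] if word and word[-1] in ",;" else ""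
--         color = word[:-1] if delim else word
--         if color in place:
--             cur[place[color]] += int(number)
--         if delim == ";":
--             best = [max(b, c) for b, c in zip(best, cur)]
--             cur = [0, 0, 0]
--     return [max(b, c) for b, c in zip(best, cur)]
-- ===== Notes on version B (the rewrite author's own statement) =====
-- stated objective: alternative
-- what changed: Replaces A's three-level nested splitting ('; ' then ', ' then ' ') with running-max triples by a flat single tokenization on ' ' walked two tokens at a time as (count, word) pairs, where a word's trailing ','/';' is the delimiter that ended its chunk and ';' flushes the hand into the running maxima - a delimiter-carrying token state machine instead of nested splits.
-- outside the precondition, e.g. on game_min_cubes('1 red;'): A returns [0, 0, 0], B returns [1, 0, 0]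
import Mathlib
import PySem

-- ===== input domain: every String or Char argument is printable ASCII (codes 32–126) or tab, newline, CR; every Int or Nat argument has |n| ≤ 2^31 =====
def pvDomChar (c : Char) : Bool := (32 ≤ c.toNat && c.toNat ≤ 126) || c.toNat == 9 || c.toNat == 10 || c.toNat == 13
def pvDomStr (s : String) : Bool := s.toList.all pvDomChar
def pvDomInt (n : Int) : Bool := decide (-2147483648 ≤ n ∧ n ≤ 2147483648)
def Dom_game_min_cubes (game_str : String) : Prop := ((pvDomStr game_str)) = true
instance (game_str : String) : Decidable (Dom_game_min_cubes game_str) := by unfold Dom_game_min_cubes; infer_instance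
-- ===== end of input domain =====

-- B replaces A's three-level nested splitting with a single flat tokenization on " "
-- walked as (count, word) pairs, a word's trailing ','/';' acting as the chunk delimiter
-- (alternative decomposition; same cost).

-- color-name literals shared by both ports
def pvRed : List Char := ['r', 'e', 'd']
def pvGreen : List Char := ['g', 'r', 'e', 'e', 'n']
def pvBlue : List Char := ['b', 'l', 'u', 'e']
-- int(number); Pre_ keeps out the inputs where Python raises ValueError here
def pvInt (n : List Char) : Int := (PySem.Int.ofChars? n).getD 0

-- ===== PORT A =====
-- one `color_str` of A's inner loop: `number, color = color_str.split(" ")` + the if/elif chain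
def pvStepColor (h : Int × Int × Int) (color_str : List Char) : Int × Int × Int :=
  match PySem.Chars.splitOn color_str [' '] with
  | [number, color] =>
    if color = pvRed then (h.1 + pvInt number, h.2.1, h.2.2)
    else if color = pvGreen then (h.1, h.2.1 + pvInt number, h.2.2)
    else if color = pvBlue then (h.1, h.2.1, h.2.2 + pvInt number)
    else h
  | _ => h  -- unreachable under Pre_ (tuple unpacking raises ValueError there)

-- `hand_min` after the inner loop over hand_str.split(", ")
def pvHandA (hand_str : List Char) : Int × Int × Int :=
  (PySem.Chars.splitOn hand_str [',', ' ']).foldl pvStepColor (0, 0, 0)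

-- the componentwise-max update of game_min at the end of each outer iteration
def pvStepHand (g : Int × Int × Int) (hand_str : List Char) : Int × Int × Int :=
  let hm := pvHandA hand_str
  (max g.1 hm.1, max g.2.1 hm.2.1, max g.2.2 hm.2.2)

def game_min_cubes (game_str : String) : List Int :=
  let gm := (PySem.Chars.splitOn game_str.toList [';', ' ']).foldl pvStepHand (0, 0, 0)
  [gm.1, gm.2.1, gm.2.2]

-- ===== PORT B =====
-- `if color in place: cur[place[color]] += int(number)`
def pvAddColor (cur : Int × Int × Int) (color number : List Char) : Int × Int × Int :=
  if color = pvRed then (cur.1 + pvInt number, cur.2.1, cur.2.2)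
  else if color = pvGreen then (cur.1, cur.2.1 + pvInt number, cur.2.2)
  else if color = pvBlue then (cur.1, cur.2.1, cur.2.2 + pvInt number)
  else cur

-- `[max(b, c) for b, c in zip(best, cur)]`
def pvFlush (best cur : Int × Int × Int) : Int × Int × Int :=
  (max best.1 cur.1, max best.2.1 cur.2.1, max best.2.2 cur.2.2)

-- the stride-2 loop `number, word = tokens[i:i + 2]` as the obvious two-at-a-time
-- recursion; word[-1] is getLast?, word[:-1] is dropLast.  The `| _` default covers
-- the exhausted stream ([] — and the dangling-token case, where Python B raises
-- ValueError, which Pre_ keeps out just as it keeps out A's ValueErrors)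
def pvWalk : List (List Char) → Int × Int × Int → Int × Int × Int → Int × Int × Int
  | number :: word :: rest, best, cur =>
    let color := if word.getLast? = some ',' ∨ word.getLast? = some ';' then word.dropLast else word
    let cur' := pvAddColor cur color number
    if word.getLast? = some ';' then pvWalk rest (pvFlush best cur') (0, 0, 0)
    else pvWalk rest best cur'
  | _, best, cur => pvFlush best cur

def game_min_cubes_alt (game_str : String) : List Int :=
  let gm := pvWalk (PySem.Chars.splitOn game_str.toList [' ']) (0, 0, 0) (0, 0, 0)
  [gm.1, gm.2.1, gm.2.2]

-- ===== PRECONDITION & SPEC =====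
-- Pre_ excludes (a) the inputs where A raises ValueError (a chunk not splitting into exactly
-- two space-separated tokens, or an unparsable count before a named color), and (b) strings
-- ending in ';' or ',' — a dangling trailing delimiter, malformed input on which A keeps the
-- delimiter inside the color word and silently ignores the chunk while B's tokenizer reads it
-- as a separator; either reading is defensible, so those inputs are carved out.
def Pre_game_min_cubes (game_str : String) : Prop :=
  (∀ hand ∈ PySem.Chars.splitOn game_str.toList [';', ' '],
    ∀ cs ∈ PySem.Chars.splitOn hand [',', ' '],
      (PySem.Chars.splitOn cs [' ']).length = 2 ∧
      (((PySem.Chars.splitOn cs [' ']).getD 1 [] = pvRed ∨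
        (PySem.Chars.splitOn cs [' ']).getD 1 [] = pvGreen ∨
        (PySem.Chars.splitOn cs [' ']).getD 1 [] = pvBlue) →
        (PySem.Int.ofChars? ((PySem.Chars.splitOn cs [' ']).getD 0 [])).isSome = true))
  ∧ game_str.toList.getLast? ≠ some ';' ∧ game_str.toList.getLast? ≠ some ','
instance (game_str : String) : Decidable (Pre_game_min_cubes game_str) := by
  unfold Pre_game_min_cubes; infer_instance

def pvWitness_game_min_cubes : String := "1 red, 2 green; 3 blue, 2 red"

def Spec_game_min_cubes (game_str : String) (out : List Int) : Prop := out = game_min_cubes_alt game_str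
instance (game_str : String) (out : List Int) : Decidable (Spec_game_min_cubes game_str out) := by unfold Spec_game_min_cubes; infer_instance

-- ===== CLAIM (what is proved, stated in full; the proofs are below) =====
def Claim_equal_game_min_cubes : Prop := ∀ (game_str : String), Dom_game_min_cubes game_str → Pre_game_min_cubes game_str → Spec_game_min_cubes game_str (game_min_cubes game_str)

-- ===== LEMMAS AND PROOFS =====

-- prepend a chunk onto the head of a split result (the accumulator shape of splitOn.go)
def pvHd (p : List Char) : List (List Char) → List (List Char)
  | [] => [p]
  | x :: xs => (p ++ x) :: xs

-- clean recursive characterization of s.split(sep) for non-empty sep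
def pvSplitCl (sep : List Char) (l : List Char) : List (List Char) :=
  match l with
  | [] => [[]]
  | c :: rest =>
    if h : sep.isPrefixOf (c :: rest) ∧ sep ≠ [] then
      [] :: pvSplitCl sep ((c :: rest).drop sep.length)
    else pvHd [c] (pvSplitCl sep rest)
termination_by l.length
decreasing_by
  · have h1 : 1 ≤ sep.length := List.length_pos_iff.mpr h.2
    simp only [List.length_drop, List.length_cons]
    omega
  · simp

theorem pvSplitCl_nil (sep : List Char) : pvSplitCl sep [] = [[]] := by rw [pvSplitCl]

theorem pvSplitCl_pos (sep : List Char) (c : Char) (rest : List Char)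
    (h : sep.isPrefixOf (c :: rest) = true ∧ sep ≠ []) :
    pvSplitCl sep (c :: rest) = [] :: pvSplitCl sep ((c :: rest).drop sep.length) := by
  rw [pvSplitCl, dif_pos h]

theorem pvSplitCl_neg (sep : List Char) (c : Char) (rest : List Char)
    (h : ¬(sep.isPrefixOf (c :: rest) = true ∧ sep ≠ [])) :
    pvSplitCl sep (c :: rest) = pvHd [c] (pvSplitCl sep rest) := by
  rw [pvSplitCl, dif_neg h]

theorem pvHd_ne_nil (p : List Char) (xs : List (List Char)) : pvHd p xs ≠ [] := by
  cases xs <;> simp [pvHd]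

theorem pvSplitCl_ne_nil (sep l : List Char) : pvSplitCl sep l ≠ [] := by
  cases l with
  | nil => simp [pvSplitCl_nil]
  | cons c rest =>
    by_cases h : sep.isPrefixOf (c :: rest) = true ∧ sep ≠ []
    · rw [pvSplitCl_pos sep c rest h]; simp
    · rw [pvSplitCl_neg sep c rest h]; exact pvHd_ne_nil _ _

theorem pvHd_append (a b : List Char) (xs : List (List Char)) :
    pvHd (a ++ b) xs = pvHd a (pvHd b xs) := by
  cases xs <;> simp [pvHd]

theorem pvHd_nil_eq (xs : List (List Char)) (h : xs ≠ []) : pvHd [] xs = xs := by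
  cases xs <;> simp_all [pvHd]

theorem pvHd_append_right (p : List Char) (xs ys : List (List Char)) (h : xs ≠ []) :
    pvHd p (xs ++ ys) = pvHd p xs ++ ys := by
  cases xs <;> simp_all [pvHd]

-- splitOn.go with enough fuel computes pvSplitCl
theorem pv_go_eq (sep : List Char) (hsep : sep ≠ []) :
    ∀ (fuel : Nat) (l cur : List Char) (acc : List (List Char)), l.length < fuel →
      PySem.Chars.splitOn.go sep fuel l cur acc = acc.reverse ++ pvHd cur.reverse (pvSplitCl sep l) := by
  intro fuel
  induction fuel with
  | zero => intro l cur acc h; omega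
  | succ n ih =>
    intro l cur acc h
    cases l with
    | nil =>
      rw [PySem.Chars.splitOn.go]
      · simp [pvSplitCl_nil, pvHd]
      · omega
    | cons c rest =>
      conv_lhs => rw [PySem.Chars.splitOn.go]
      by_cases hp : sep.isPrefixOf (c :: rest) = true
      · simp only [hp, if_true]
        have hl : ((c :: rest).drop sep.length).length < n := by
          have h1 : 1 ≤ sep.length := List.length_pos_iff.mpr hsep
          simp only [List.length_drop, List.length_cons] at *
          omega
        rw [ih _ [] (cur.reverse :: acc) hl]
        rw [show ([] : List Char).reverse = [] from rfl, pvHd_nil_eq _ (pvSplitCl_ne_nil _ _)]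
        rw [pvSplitCl_pos sep c rest ⟨hp, hsep⟩]
        simp [pvHd]
      · simp only [hp]
        have hl : rest.length < n := by simp at h; omega
        rw [if_neg (by simp [hp]), ih rest (c :: cur) acc hl]
        rw [pvSplitCl_neg sep c rest (by simp [hp])]
        simp [pvHd_append]

theorem pv_splitOn_eq (sep l : List Char) (hsep : sep ≠ []) :
    PySem.Chars.splitOn l sep = pvSplitCl sep l := by
  unfold PySem.Chars.splitOn
  rw [pv_go_eq sep hsep _ _ _ _ (by omega)]
  simp [pvHd_nil_eq _ (pvSplitCl_ne_nil sep l)]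

theorem pv_intercalate_cons₂ (sep x y : List Char) (xs : List (List Char)) :
    List.intercalate sep (x :: y :: xs) = x ++ sep ++ List.intercalate sep (y :: xs) := by
  simp [List.intercalate, List.intersperse]

theorem pv_intercalate_hd (sep : List Char) (c : Char) (xs : List (List Char)) (h : xs ≠ []) :
    List.intercalate sep (pvHd [c] xs) = c :: List.intercalate sep xs := by
  cases xs with
  | nil => exact absurd rfl h
  | cons x t =>
    cases t with
    | nil => simp [pvHd, List.intercalate, List.intersperse]
    | cons y t' =>
      show List.intercalate sep ((c :: x) :: y :: t') = _
      rw [pv_intercalate_cons₂, pv_intercalate_cons₂]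
      simp

-- join ∘ split = id
theorem pv_join (sep : List Char) (l : List Char) :
    List.intercalate sep (pvSplitCl sep l) = l := by
  induction l using pvSplitCl.induct sep with
  | case1 => simp [pvSplitCl_nil, List.intercalate, List.intersperse]
  | case2 c rest h ih =>
    rw [pvSplitCl_pos sep c rest h]
    obtain ⟨x, t, hxt⟩ : ∃ x t, pvSplitCl sep ((c :: rest).drop sep.length) = x :: t := by
      rcases he : pvSplitCl sep ((c :: rest).drop sep.length) with _ | ⟨x, t⟩
      · exact absurd he (pvSplitCl_ne_nil _ _)
      · exact ⟨x, t, rfl⟩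
    rw [hxt] at ih ⊢
    rw [pv_intercalate_cons₂, ih]
    have hpre : sep <+: (c :: rest) := List.isPrefixOf_iff_prefix.mp h.1
    obtain ⟨tail, htail⟩ := hpre
    rw [← htail]; rw [← htail] at *
    simp
  | case3 c rest h ih =>
    rw [pvSplitCl_neg sep c rest h]
    rw [pv_intercalate_hd sep c _ (pvSplitCl_ne_nil _ _), ih]

theorem pv_space_pos (b : List Char) :
    pvSplitCl [' '] (' ' :: b) = [] :: pvSplitCl [' '] b := by
  rw [pvSplitCl_pos [' '] ' ' b (by simp [List.isPrefixOf])]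
  simp

theorem pv_space_neg (c : Char) (hc : c ≠ ' ') (b : List Char) :
    pvSplitCl [' '] (c :: b) = pvHd [c] (pvSplitCl [' '] b) := by
  rw [pvSplitCl_neg [' '] c b]
  simp [List.isPrefixOf]
  intro h; exact absurd h.symm hc

-- the space-split distributes over an interior space
theorem pv_space_append (a b : List Char) :
    pvSplitCl [' '] (a ++ ' ' :: b) = pvSplitCl [' '] a ++ pvSplitCl [' '] b := by
  induction a with
  | nil => simp [pv_space_pos, pvSplitCl_nil]
  | cons c a' ih =>
    by_cases hc : c = ' '
    · subst hc
      rw [List.cons_append, pv_space_pos, pv_space_pos, ih]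
      simp
    · rw [List.cons_append, pv_space_neg c hc, pv_space_neg c hc, ih,
        pvHd_append_right _ _ _ (pvSplitCl_ne_nil _ _)]

-- append a non-space delimiter to the last token
def pvMapLast (d : Char) : List (List Char) → List (List Char)
  | [] => []
  | [x] => [x ++ [d]]
  | x :: xs => x :: pvMapLast d xs

theorem pvMapLast_cons (d : Char) (x : List Char) (xs : List (List Char)) (h : xs ≠ []) :
    pvMapLast d (x :: xs) = x :: pvMapLast d xs := by
  cases xs <;> simp_all [pvMapLast]

theorem pvMapLast_append (d : Char) (xs ys : List (List Char)) (h : ys ≠ []) :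
    pvMapLast d (xs ++ ys) = xs ++ pvMapLast d ys := by
  induction xs with
  | nil => simp
  | cons x xs ih =>
    rw [List.cons_append, pvMapLast_cons d x (xs ++ ys) (by simp [h]), ih]; simp

theorem pvHd_mapLast_comm (c d : Char) (xs : List (List Char)) (h : xs ≠ []) :
    pvHd [c] (pvMapLast d xs) = pvMapLast d (pvHd [c] xs) := by
  cases xs with
  | nil => exact absurd rfl h
  | cons x t =>
    cases t with
    | nil => simp [pvMapLast, pvHd]
    | cons y t' =>
      rw [pvMapLast_cons d x (y :: t') (by simp)]
      show pvHd [c] _ = pvMapLast d ((c :: x) :: y :: t')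
      rw [pvMapLast_cons d (c :: x) (y :: t') (by simp)]
      simp [pvHd]

theorem pv_space_snoc (d : Char) (hd : d ≠ ' ') (x : List Char) :
    pvSplitCl [' '] (x ++ [d]) = pvMapLast d (pvSplitCl [' '] x) := by
  induction x with
  | nil =>
    rw [List.nil_append, pv_space_neg d hd, pvSplitCl_nil]
    simp [pvHd, pvMapLast]
  | cons c x' ih =>
    by_cases hc : c = ' '
    · subst hc
      rw [List.cons_append, pv_space_pos, pv_space_pos, ih,
        pvMapLast_cons d [] _ (pvSplitCl_ne_nil _ _)]
    · rw [List.cons_append, pv_space_neg c hc, pv_space_neg c hc, ih,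
        pvHd_mapLast_comm c d _ (pvSplitCl_ne_nil _ _)]

theorem pv_getLast?_append (xs ys : List Char) (h : ys ≠ []) :
    (xs ++ ys).getLast? = ys.getLast? := by
  rw [List.getLast?_append]
  rcases hy : ys.getLast? with _ | a
  · exact absurd (List.getLast?_eq_none_iff.mp hy) h
  · rfl

-- A's inner step equals B's color update once the chunk's two tokens are known
theorem pvStepColor_eq (cur : Int × Int × Int) (cs n c : List Char)
    (h : PySem.Chars.splitOn cs [' '] = [n, c]) :
    pvStepColor cur cs = pvAddColor cur c n := by
  simp [pvStepColor, pvAddColor, h]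

-- a length-2 space-split determines the chunk's shape
theorem pv_two_tokens (cs : List Char) (h : (pvSplitCl [' '] cs).length = 2) :
    ∃ n c, pvSplitCl [' '] cs = [n, c] ∧ cs = n ++ ' ' :: c := by
  obtain ⟨n, c, hnc⟩ := List.length_eq_two.mp h
  refine ⟨n, c, hnc, ?_⟩
  have hj := pv_join [' '] cs
  rw [hnc, pv_intercalate_cons₂] at hj
  simp only [List.intercalate, List.intersperse, List.flatten] at hj
  rw [← hj]; simp

-- walking the tokens of the final hand
theorem pv_walk_final : ∀ (css : List (List Char)), css ≠ [] →
    (∀ cs ∈ css, (pvSplitCl [' '] cs).length = 2) →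
    (List.intercalate [',', ' '] css).getLast? ≠ some ';' →
    (List.intercalate [',', ' '] css).getLast? ≠ some ',' →
    ∀ best cur, pvWalk (pvSplitCl [' '] (List.intercalate [',', ' '] css)) best cur
      = pvFlush best (css.foldl pvStepColor cur) := by
  intro css
  induction css with
  | nil => intro hne; exact absurd rfl hne
  | cons cs css' ih =>
    intro _ h2 hl1 hl2 best cur
    obtain ⟨n, c, hnc, hcs⟩ := pv_two_tokens cs (h2 cs (by simp))
    have hsp : PySem.Chars.splitOn cs [' '] = [n, c] := by
      rw [pv_splitOn_eq _ _ (by simp)]; exact hnc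
    cases css' with
    | nil =>
      have hsing : List.intercalate [',', ' '] [cs] = cs := by
        simp [List.intercalate, List.intersperse]
      rw [hsing] at hl1 hl2 ⊢
      rw [hnc]
      have hcg : c.getLast? ≠ some ';' ∧ c.getLast? ≠ some ',' := by
        rcases hc : c with _ | ⟨a, t⟩
        · simp
        · rw [← hc]
          have : cs.getLast? = c.getLast? := by
            rw [hcs, show n ++ ' ' :: c = (n ++ [' ']) ++ c by simp,
              pv_getLast?_append _ _ (by simp [hc])]
          rw [this] at hl1 hl2
          exact ⟨hl1, hl2⟩
      simp [pvWalk, hcg.1, hcg.2, pvStepColor_eq cur cs n c hsp]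
    | cons cs2 css'' =>
      rw [pv_intercalate_cons₂,
        show cs ++ [',', ' '] ++ List.intercalate [',', ' '] (cs2 :: css'') =
          (cs ++ [',']) ++ ' ' :: List.intercalate [',', ' '] (cs2 :: css'') by simp,
        pv_space_append, pv_space_snoc ',' (by decide), hnc]
      have hml : pvMapLast ',' [n, c] = [n, c ++ [',']] := by
        rw [pvMapLast_cons ',' n [c] (by simp)]; rfl
      rw [hml]
      have hw : (c ++ [',']).getLast? = some ',' := by simp
      have hstep : pvWalk ((n :: (c ++ [',']) :: []) ++ pvSplitCl [' ']
            (List.intercalate [',', ' '] (cs2 :: css''))) best cur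
          = pvWalk (pvSplitCl [' '] (List.intercalate [',', ' '] (cs2 :: css'')))
              best (pvAddColor cur c n) := by
        simp [pvWalk, hw]
      rw [hstep]
      have hl' : (List.intercalate [',', ' '] (cs2 :: css'')).getLast? ≠ some ';' ∧
          (List.intercalate [',', ' '] (cs2 :: css'')).getLast? ≠ some ',' := by
        by_cases hr : List.intercalate [',', ' '] (cs2 :: css'') = []
        · rw [hr]; simp
        · have : (cs ++ [',', ' '] ++ List.intercalate [',', ' '] (cs2 :: css'')).getLast? =
              (List.intercalate [',', ' '] (cs2 :: css'')).getLast? := by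
            rw [List.append_assoc, pv_getLast?_append _ _ (by simp [hr]),
              pv_getLast?_append _ _ hr]
          rw [pv_intercalate_cons₂, this] at hl1 hl2
          exact ⟨hl1, hl2⟩
      rw [ih (by simp) (fun x hx => h2 x (by simp [hx])) hl'.1 hl'.2]
      simp only [List.foldl_cons]
      rw [pvStepColor_eq cur cs n c hsp]

-- walking the tokens of a non-final hand (';' appended) continues with the remaining tokens
theorem pv_walk_mid : ∀ (css : List (List Char)), css ≠ [] →
    (∀ cs ∈ css, (pvSplitCl [' '] cs).length = 2) →
    ∀ (rest : List (List Char)) best cur,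
      pvWalk (pvMapLast ';' (pvSplitCl [' '] (List.intercalate [',', ' '] css)) ++ rest) best cur
      = pvWalk rest (pvFlush best (css.foldl pvStepColor cur)) (0, 0, 0) := by
  intro css
  induction css with
  | nil => intro hne; exact absurd rfl hne
  | cons cs css' ih =>
    intro _ h2 rest best cur
    obtain ⟨n, c, hnc, hcs⟩ := pv_two_tokens cs (h2 cs (by simp))
    have hsp : PySem.Chars.splitOn cs [' '] = [n, c] := by
      rw [pv_splitOn_eq _ _ (by simp)]; exact hnc
    cases css' with
    | nil =>
      have hsing : List.intercalate [',', ' '] [cs] = cs := by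
        simp [List.intercalate, List.intersperse]
      rw [hsing, hnc]
      have hml : pvMapLast ';' [n, c] = [n, c ++ [';']] := by
        rw [pvMapLast_cons ';' n [c] (by simp)]; rfl
      rw [hml]
      have hw : (c ++ [';']).getLast? = some ';' := by simp
      simp [pvWalk, hw, pvStepColor_eq cur cs n c hsp]
    | cons cs2 css'' =>
      rw [pv_intercalate_cons₂,
        show cs ++ [',', ' '] ++ List.intercalate [',', ' '] (cs2 :: css'') =
          (cs ++ [',']) ++ ' ' :: List.intercalate [',', ' '] (cs2 :: css'') by simp,
        pv_space_append, pv_space_snoc ',' (by decide), hnc]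
      have hml : pvMapLast ',' [n, c] = [n, c ++ [',']] := by
        rw [pvMapLast_cons ',' n [c] (by simp)]; rfl
      rw [hml,
        pvMapLast_append ';' _ _ (pvSplitCl_ne_nil _ _)]
      have hw : (c ++ [',']).getLast? = some ',' := by simp
      have hstep : pvWalk ((n :: (c ++ [',']) :: []) ++ (pvMapLast ';' (pvSplitCl [' ']
            (List.intercalate [',', ' '] (cs2 :: css''))) ++ rest)) best cur
          = pvWalk (pvMapLast ';' (pvSplitCl [' ']
              (List.intercalate [',', ' '] (cs2 :: css''))) ++ rest)
              best (pvAddColor cur c n) := by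
        simp [pvWalk, hw]
      rw [List.append_assoc, hstep, ih (by simp) (fun x hx => h2 x (by simp [hx])) rest]
      simp only [List.foldl_cons]
      rw [pvStepColor_eq cur cs n c hsp]
    -- (continued below)

-- A's outer-loop step written through pvSplitCl
theorem pvStepHand_eq (g : Int × Int × Int) (h : List Char) :
    pvStepHand g h = pvFlush g ((pvSplitCl [',', ' '] h).foldl pvStepColor (0, 0, 0)) := by
  simp [pvStepHand, pvHandA, pvFlush, pv_splitOn_eq [',', ' '] h (by decide)]

-- the full walk over all hands equals A's outer fold
theorem pv_walk_hands : ∀ (hands : List (List Char)), hands ≠ [] →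
    (∀ h ∈ hands, ∀ cs ∈ pvSplitCl [',', ' '] h, (pvSplitCl [' '] cs).length = 2) →
    (List.intercalate [';', ' '] hands).getLast? ≠ some ';' →
    (List.intercalate [';', ' '] hands).getLast? ≠ some ',' →
    ∀ best, pvWalk (pvSplitCl [' '] (List.intercalate [';', ' '] hands)) best (0, 0, 0)
      = hands.foldl pvStepHand best := by
  intro hands
  induction hands with
  | nil => intro hne; exact absurd rfl hne
  | cons h hands' ih =>
    intro _ h2 hl1 hl2 best
    have hcss := pv_join [',', ' '] h
    cases hands' with
    | nil =>
      have hsing : List.intercalate [';', ' '] [h] = h := by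
        simp [List.intercalate, List.intersperse]
      rw [hsing] at hl1 hl2 ⊢
      conv_lhs => rw [← hcss]
      rw [pv_walk_final (pvSplitCl [',', ' '] h) (pvSplitCl_ne_nil _ _) (h2 h (by simp))
        (by rw [hcss]; exact hl1) (by rw [hcss]; exact hl2)]
      simp only [List.foldl_cons, List.foldl_nil]
      rw [pvStepHand_eq]
    | cons h2' t =>
      rw [pv_intercalate_cons₂,
        show h ++ [';', ' '] ++ List.intercalate [';', ' '] (h2' :: t) =
          (h ++ [';']) ++ ' ' :: List.intercalate [';', ' '] (h2' :: t) by simp,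
        pv_space_append, pv_space_snoc ';' (by decide)]
      conv_lhs => rw [show pvSplitCl [' '] h =
        pvSplitCl [' '] (List.intercalate [',', ' '] (pvSplitCl [',', ' '] h)) by rw [hcss]]
      rw [pv_walk_mid (pvSplitCl [',', ' '] h) (pvSplitCl_ne_nil _ _) (h2 h (by simp))
        (pvSplitCl [' '] (List.intercalate [';', ' '] (h2' :: t))) best (0, 0, 0),
        ← pvStepHand_eq]
      have hl' : (List.intercalate [';', ' '] (h2' :: t)).getLast? ≠ some ';' ∧
          (List.intercalate [';', ' '] (h2' :: t)).getLast? ≠ some ',' := by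
        by_cases hr : List.intercalate [';', ' '] (h2' :: t) = []
        · rw [hr]; simp
        · rw [pv_intercalate_cons₂, List.append_assoc,
            pv_getLast?_append _ _ (by simp [hr]), pv_getLast?_append _ _ hr] at hl1 hl2
          exact ⟨hl1, hl2⟩
      rw [ih (by simp) (fun x hx => h2 x (by simp [hx])) hl'.1 hl'.2 (pvStepHand best h)]
      simp

-- ===== VERDICT (by name: the statement is the Claim_ definition above) =====
theorem game_min_cubes_spec : Claim_equal_game_min_cubes := by
  intro s _ hpre
  obtain ⟨h2, hl1, hl2⟩ := hpre
  unfold Spec_game_min_cubes game_min_cubes game_min_cubes_alt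
  have hh : s.toList = List.intercalate [';', ' '] (pvSplitCl [';', ' '] s.toList) :=
    (pv_join [';', ' '] s.toList).symm
  have hc2 : ∀ h ∈ pvSplitCl [';', ' '] s.toList, ∀ cs ∈ pvSplitCl [',', ' '] h,
      (pvSplitCl [' '] cs).length = 2 := by
    intro h hh' cs hcs
    have := (h2 h (by rw [pv_splitOn_eq [';', ' '] s.toList (by decide)]; exact hh')
      cs (by rw [pv_splitOn_eq [',', ' '] h (by decide)]; exact hcs)).1
    rw [pv_splitOn_eq [' '] cs (by decide)] at this
    exact this
  have hmain := pv_walk_hands (pvSplitCl [';', ' '] s.toList) (pvSplitCl_ne_nil _ _) hc2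
    (by rw [← hh]; exact hl1) (by rw [← hh]; exact hl2) (0, 0, 0)
  rw [← hh] at hmain
  rw [pv_splitOn_eq [';', ' '] s.toList (by decide), pv_splitOn_eq [' '] s.toList (by decide),
    hmain]
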